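-- pv_equiv track=rewrite | github.com/aqsnyder/kicad-library | lib_manager.py | extract_symbol_info
-- ===== SOURCE A (Python) =====
-- from typing import List, Dict, Optional, Tuple, Set
--
-- def extract_symbol_info(symbol_content: str) -> Dict[str, str]:
--     """Extract symbol information including datasheet and footprint"""
--     info = {
--         'name': '',
--         'datasheet': '',
--         'footprint': '',
--         'content': symbol_content
--     }
--
--     lines = symbol_content.split('\n')
--     for line in lines:
--         if line.strip().startswith('(symbol "'):
--             name_start = line.find('"') + 1
--             name_end = line.find('"', name_start)
--             if name_start > 0 and name_end > name_start:
--                 info['name'] = line[name_start:name_end]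
--
--         elif 'property "Datasheet"' in line and 'http' in line:
--             url_start = line.find('http')
--             if url_start != -1:
--                 url_end = line.find('"', url_start)
--                 if url_end == -1:
--                     url_end = line.find(')', url_start)
--                 if url_end != -1:
--                     info['datasheet'] = line[url_start:url_end]
--
--         elif 'property "Footprint"' in line:
--             quotes = [i for i, c in enumerate(line) if c == '"']
--             if len(quotes) >= 4:
--                 info['footprint'] = line[quotes[2]+1:quotes[3]]
--
--     return info
-- ===== SOURCE B (Python) =====
-- def extract_symbol_info(symbol_content: str):
--     """Extract symbol info as three independent last-match searches over the lines."""
--     lines = symbol_content.split('\n')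
--
--     def name_of(line):
--         if not line.strip().startswith('(symbol "'):
--             return None
--         start = line.find('"') + 1
--         end = line.find('"', start)
--         return line[start:end] if start > 0 and end > start else None
--
--     def datasheet_of(line):
--         if 'property "Datasheet"' not in line or 'http' not in line:
--             return None
--         start = line.find('http')
--         end = line.find('"', start)
--         if end == -1:
--             end = line.find(')', start)
--         return line[start:end] if end != -1 else None
--
--     def footprint_of(line):
--         if 'property "Footprint"' not in line:
--             return None
--         quotes = [i for i, c in enumerate(line) if c == '"']
--         return line[quotes[2] + 1:quotes[3]] if len(quotes) >= 4 else None
--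
--     def last(extract):
--         return next((v for v in map(extract, reversed(lines)) if v is not None), '')
--
--     return {
--         'name': last(name_of),
--         'datasheet': last(datasheet_of),
--         'footprint': last(footprint_of),
--         'content': symbol_content,
--     }
-- ===== Notes on version B (the rewrite author's own statement) =====
-- stated objective: alternative
-- what changed: A's single forward per-line loop with an elif chain mutating a dict last-wins is replaced by three independent field extractors, each found as the first successful match scanning the lines in reverse; Pre_ excludes inputs containing a line that matches more than one of the three patterns (symbol header / Datasheet+http / Footprint), on which A's elif-chain precedence picks one field arbitrarily.
import Mathlib
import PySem

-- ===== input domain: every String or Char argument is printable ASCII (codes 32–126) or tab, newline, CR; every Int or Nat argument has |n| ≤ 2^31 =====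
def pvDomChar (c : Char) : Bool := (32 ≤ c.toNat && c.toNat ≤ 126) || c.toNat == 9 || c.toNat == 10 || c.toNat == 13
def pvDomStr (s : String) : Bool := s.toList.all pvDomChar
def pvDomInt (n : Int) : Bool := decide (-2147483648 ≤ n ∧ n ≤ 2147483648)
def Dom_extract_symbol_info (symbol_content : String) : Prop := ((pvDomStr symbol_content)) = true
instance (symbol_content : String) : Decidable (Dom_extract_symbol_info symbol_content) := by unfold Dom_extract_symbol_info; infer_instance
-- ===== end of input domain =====

-- B replaces A's single branchy last-wins loop by three independent backward first-match
-- searches over the lines (objective: alternative decomposition; same asymptotic cost).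

-- ===== PORT A =====
-- one iteration of A's 'for line in lines' loop, mutating the info dict
def pvAStep (info : PySem.Dict String String) (line : String) : PySem.Dict String String :=
  if PySem.Str.startswith (PySem.Str.strip line) "(symbol \"" then
    let name_start : Int := PySem.Str.find line "\"" + 1
    let name_end : Int := PySem.Str.findFrom line "\"" name_start
    if name_start > 0 ∧ name_end > name_start then
      info.insert "name" (PySem.Str.slice line (some name_start) (some name_end))
    else info
  else if PySem.Str.isIn "property \"Datasheet\"" line && PySem.Str.isIn "http" line then
    let url_start : Int := PySem.Str.find line "http"
    if url_start ≠ -1 then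
      let url_end1 : Int := PySem.Str.findFrom line "\"" url_start
      let url_end : Int := if url_end1 == -1 then PySem.Str.findFrom line ")" url_start else url_end1
      if url_end ≠ -1 then
        info.insert "datasheet" (PySem.Str.slice line (some url_start) (some url_end))
      else info
    else info
  else if PySem.Str.isIn "property \"Footprint\"" line then
    let quotes : List Int := ((PySem.List.enumerate line.toList 0).filter (fun p => p.2 == '"')).map (·.1)
    if quotes.length ≥ 4 then
      info.insert "footprint"
        (PySem.Str.slice line (some (PySem.List.pyGetD quotes 2 0 + 1)) (some (PySem.List.pyGetD quotes 3 0)))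
    else info
  else info

def extract_symbol_info (symbol_content : String) : List (String × String) :=
  let info : PySem.Dict String String :=
    PySem.Dict.ofList [("name", ""), ("datasheet", ""), ("footprint", ""), ("content", symbol_content)]
  let lines := (PySem.Str.split? symbol_content "\n").getD []
  (lines.foldl pvAStep info).items

-- ===== PORT B =====
def pvNameOf (line : String) : Option String :=
  if !(PySem.Str.startswith (PySem.Str.strip line) "(symbol \"") then none
  else
    let start : Int := PySem.Str.find line "\"" + 1
    let stop : Int := PySem.Str.findFrom line "\"" start
    if start > 0 ∧ stop > start then some (PySem.Str.slice line (some start) (some stop)) else none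

def pvDatasheetOf (line : String) : Option String :=
  if !(PySem.Str.isIn "property \"Datasheet\"" line) || !(PySem.Str.isIn "http" line) then none
  else
    let start : Int := PySem.Str.find line "http"
    let e1 : Int := PySem.Str.findFrom line "\"" start
    let e : Int := if e1 == -1 then PySem.Str.findFrom line ")" start else e1
    if e ≠ -1 then some (PySem.Str.slice line (some start) (some e)) else none

def pvFootprintOf (line : String) : Option String :=
  if !(PySem.Str.isIn "property \"Footprint\"" line) then none
  else
    let quotes : List Int := ((PySem.List.enumerate line.toList 0).filter (fun p => p.2 == '"')).map (·.1)
    if quotes.length ≥ 4 then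
      some (PySem.Str.slice line (some (PySem.List.pyGetD quotes 2 0 + 1)) (some (PySem.List.pyGetD quotes 3 0)))
    else none

-- next((v for v in map(extract, reversed(lines)) if v is not None), '')
def pvLast (lines : List String) (extract : String → Option String) : String :=
  (lines.reverse.findSome? extract).getD ""

def extract_symbol_info_alt (symbol_content : String) : List (String × String) :=
  let lines := (PySem.Str.split? symbol_content "\n").getD []
  [("name", pvLast lines pvNameOf),
   ("datasheet", pvLast lines pvDatasheetOf),
   ("footprint", pvLast lines pvFootprintOf),
   ("content", symbol_content)]

-- ===== PRECONDITION & SPEC =====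
-- the three line patterns A's elif chain dispatches on
def pvIsSym (l : String) : Bool := PySem.Str.startswith (PySem.Str.strip l) "(symbol \""
def pvIsDS (l : String) : Bool := PySem.Str.isIn "property \"Datasheet\"" l && PySem.Str.isIn "http" l
def pvIsFP (l : String) : Bool := PySem.Str.isIn "property \"Footprint\"" l
def pvOneClass (l : String) : Bool := !(pvIsSym l && pvIsDS l) && !(pvIsSym l && pvIsFP l) && !(pvIsDS l && pvIsFP l)

-- Pre_ excludes inputs containing a line matching more than one of the three patterns
-- (symbol header / Datasheet+http / Footprint): there A's elif precedence picks one field arbitrarily.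
def Pre_extract_symbol_info (symbol_content : String) : Prop :=
  ((PySem.Str.split? symbol_content "\n").getD []).all pvOneClass = true
instance (symbol_content : String) : Decidable (Pre_extract_symbol_info symbol_content) := by unfold Pre_extract_symbol_info; infer_instance

def pvWitness_extract_symbol_info : String :=
  "(symbol \"R1\")\n  property \"Datasheet\" \"http://a\""

def Spec_extract_symbol_info (symbol_content : String) (out : List (String × String)) : Prop := out = extract_symbol_info_alt symbol_content
instance (symbol_content : String) (out : List (String × String)) : Decidable (Spec_extract_symbol_info symbol_content out) := by unfold Spec_extract_symbol_info; infer_instance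

-- ===== CLAIM (what is proved, stated in full; the proofs are below) =====
def Claim_equal_extract_symbol_info : Prop := ∀ (symbol_content : String), Dom_extract_symbol_info symbol_content → Pre_extract_symbol_info symbol_content → Spec_extract_symbol_info symbol_content (extract_symbol_info symbol_content)

-- ===== LEMMAS AND PROOFS =====

-- the fixed shape A's info dict keeps throughout the loop
def pvDictOf (n d f c : String) : PySem.Dict String String :=
  PySem.Dict.mk [("name", n), ("datasheet", d), ("footprint", f), ("content", c)]

theorem pvDictOf_init (c : String) :
    PySem.Dict.ofList [("name", ""), ("datasheet", ""), ("footprint", ""), ("content", c)] =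
      pvDictOf "" "" "" c := rfl

theorem pvDictOf_insert_name (n d f c v : String) :
    (pvDictOf n d f c).insert "name" v = pvDictOf v d f c := rfl

theorem pvDictOf_insert_datasheet (n d f c v : String) :
    (pvDictOf n d f c).insert "datasheet" v = pvDictOf n v f c := rfl

theorem pvDictOf_insert_footprint (n d f c v : String) :
    (pvDictOf n d f c).insert "footprint" v = pvDictOf n d v c := rfl

-- on a line matching at most one pattern, one iteration of A acts on the three
-- fields exactly as B's three independent extractors
theorem pvAStep_eq (n d f c : String) (line : String) (h : pvOneClass line = true) :
    pvAStep (pvDictOf n d f c) line =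
      pvDictOf ((pvNameOf line).getD n) ((pvDatasheetOf line).getD d)
        ((pvFootprintOf line).getD f) c := by
  unfold pvOneClass pvIsSym pvIsDS pvIsFP at h
  unfold pvAStep pvNameOf pvDatasheetOf pvFootprintOf
  by_cases h1 : PySem.Str.startswith (PySem.Str.strip line) "(symbol \"" = true <;>
    simp only [h1, Bool.not_true, Bool.not_false, if_true, if_false, Bool.false_eq_true] at h ⊢ <;>
    split_ifs <;>
    simp_all [PySem.Chars.find_eq_neg_one_iff, PySem.Chars.isIn_eq_false_iff, PySem.Chars.isIn_iff_infix, pvDictOf_insert_name, pvDictOf_insert_datasheet, pvDictOf_insert_footprint,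
      Option.getD]

-- a forward last-wins fold is a backward first-match search
theorem pvFoldl_getD_eq_findSome? (e : String → Option String) (lines : List String)
    (init : String) :
    lines.foldl (fun acc l => (e l).getD acc) init = ((lines.reverse.findSome? e).getD init) := by
  induction lines generalizing init with
  | nil => rfl
  | cons l ls ih =>
    simp only [List.foldl_cons, List.reverse_cons, List.findSome?_append, ih]
    cases hx : ls.reverse.findSome? e
    · cases he : e l <;> simp [List.findSome?, he]
    · simp

theorem pvFoldl_dict (lines : List String) (n d f c : String)
    (h : ∀ l ∈ lines, pvOneClass l = true) :
    lines.foldl pvAStep (pvDictOf n d f c) =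
      pvDictOf (lines.foldl (fun acc l => (pvNameOf l).getD acc) n)
        (lines.foldl (fun acc l => (pvDatasheetOf l).getD acc) d)
        (lines.foldl (fun acc l => (pvFootprintOf l).getD acc) f) c := by
  induction lines generalizing n d f with
  | nil => rfl
  | cons l ls ih =>
    simp only [List.foldl_cons, pvAStep_eq _ _ _ _ _ (h l (List.mem_cons_self ..))]
    exact ih _ _ _ (fun x hx => h x (List.mem_cons_of_mem _ hx))

-- ===== VERDICT (by name: the statement is the Claim_ definition above) =====
theorem extract_symbol_info_spec : Claim_equal_extract_symbol_info := by
  intro s _ hpre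
  unfold Pre_extract_symbol_info at hpre
  rw [List.all_eq_true] at hpre
  unfold Spec_extract_symbol_info extract_symbol_info extract_symbol_info_alt
  dsimp only
  rw [pvDictOf_init, pvFoldl_dict _ "" "" "" s hpre,
    pvFoldl_getD_eq_findSome? pvNameOf, pvFoldl_getD_eq_findSome? pvDatasheetOf,
    pvFoldl_getD_eq_findSome? pvFootprintOf]
  rfl
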